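-- pv_equiv track=rewrite | github.com/jmoh3/TransitionTreesComplexity | rothe_tree_builder.py | is_vexilliary
-- ===== SOURCE A (Python) =====
-- def is_vexilliary(rothe, essential_set):
--
--   for idx in range(0, len(essential_set)):
--     elem = essential_set[idx]
--     i = elem[0]
--     j = elem[1]
--
--     for idx_b in range(idx + 1, len(essential_set)):
--       to_compare = essential_set[idx_b]
--
--       if is_strictly_northwest(elem, to_compare) or is_strictly_northwest(to_compare, elem):
--         return False
--
--   return True
--
-- def is_strictly_northwest(a, b):
--   if a[0] < b[0] and a[1] < b[1]:
--     return True
--   return False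
-- ===== SOURCE B (Python) =====
-- def is_vexilliary(rothe, essential_set):
--     # Sort cells by (x asc, y desc); a strictly-northwest pair exists iff some
--     # cell's y exceeds the minimum y seen earlier in the sorted order.
--     pts = sorted(((e[0], e[1]) for e in essential_set), key=lambda p: (p[0], -p[1]))
--     min_y = None
--     for _x, y in pts:
--         if min_y is not None and min_y < y:
--             return False
--         if min_y is None or y < min_y:
--             min_y = y
--     return True
-- ===== Notes on version B (the rewrite author's own statement) =====
-- stated objective: alternative
-- what changed: Replaces the all-pairs double loop with sorting cells by (x ascending, y descending) and a single scan that tracks the minimum y seen, detecting a strictly-northwest pair; A's early exit makes it fast on typical non-vexillary inputs, so no speed is claimed.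
-- outside the precondition, e.g. on is_vexilliary([], [[1, 1], [2, 2], [3]]): A returns False, B raises IndexError
import Mathlib
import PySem

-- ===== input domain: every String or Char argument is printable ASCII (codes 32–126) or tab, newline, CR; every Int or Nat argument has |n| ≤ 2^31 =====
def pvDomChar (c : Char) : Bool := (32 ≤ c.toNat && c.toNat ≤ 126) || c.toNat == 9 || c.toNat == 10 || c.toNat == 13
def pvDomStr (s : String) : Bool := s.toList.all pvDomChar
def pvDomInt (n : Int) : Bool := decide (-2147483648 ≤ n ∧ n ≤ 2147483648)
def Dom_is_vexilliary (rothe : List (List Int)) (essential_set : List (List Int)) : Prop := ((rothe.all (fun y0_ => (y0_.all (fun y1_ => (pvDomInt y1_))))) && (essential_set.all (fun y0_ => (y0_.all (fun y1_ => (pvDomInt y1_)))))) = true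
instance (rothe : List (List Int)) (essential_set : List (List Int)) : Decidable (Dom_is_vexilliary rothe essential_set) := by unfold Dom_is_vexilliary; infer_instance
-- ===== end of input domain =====

-- B replaces A's all-pairs double loop by sort-by-(x asc, y desc) plus one min-y scan (alternative algorithm; no speed claim).

-- ===== PORT A =====
-- is_strictly_northwest(a, b)
def pvNW (a b : List Int) : Bool :=
  if PySem.List.pyGetD a 0 0 < PySem.List.pyGetD b 0 0 ∧ PySem.List.pyGetD a 1 0 < PySem.List.pyGetD b 1 0 then
    true
  else
    false

-- inner loop: for idx_b in range(idx+1, len(essential_set)), iterated over the suffix after elem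
def pvInnerA (elem : List Int) (rest : List (List Int)) : Bool :=
  match rest with
  | [] => false
  | t :: ts => if pvNW elem t || pvNW t elem then true else pvInnerA elem ts

-- outer loop over essential_set (i = elem[0], j = elem[1] are read but unused in A)
def pvOuterA (es : List (List Int)) : Bool :=
  match es with
  | [] => true
  | e :: rest => if pvInnerA e rest then false else pvOuterA rest

def is_vexilliary (rothe : List (List Int)) (essential_set : List (List Int)) : Bool :=
  pvOuterA essential_set

-- ===== PORT B =====
-- pts = [(e[0], e[1]) for e in essential_set]
def pvPts (es : List (List Int)) : List (Int × Int) :=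
  es.map (fun e => (PySem.List.pyGetD e 0 0, PySem.List.pyGetD e 1 0))

-- the scan over the sorted list, min_y : Option Int
def pvScanB : Option Int → List (Int × Int) → Bool
  | _, [] => true
  | none, p :: rest => pvScanB (some p.2) rest
  | some m, p :: rest =>
      if m < p.2 then false
      else pvScanB (some (if p.2 < m then p.2 else m)) rest

def is_vexilliary_alt (rothe : List (List Int)) (essential_set : List (List Int)) : Bool :=
  pvScanB none (PySem.List.sorted2 (pvPts essential_set) (fun p => p.1) (fun p => -p.2))

-- ===== PRECONDITION & SPEC =====
-- Pre_ excludes essential sets containing an element of length < 2: there A raises IndexError,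
-- except when an earlier pair already triggers the early `return False` (see cite); B raises there.
def Pre_is_vexilliary (rothe : List (List Int)) (essential_set : List (List Int)) : Prop :=
  ∀ e ∈ essential_set, 2 ≤ e.length
instance (rothe : List (List Int)) (essential_set : List (List Int)) : Decidable (Pre_is_vexilliary rothe essential_set) := by unfold Pre_is_vexilliary; infer_instance

def pvWitness_is_vexilliary : List (List Int) × List (List Int) := ([], [[0, 0], [1, 0]])

def Spec_is_vexilliary (rothe : List (List Int)) (essential_set : List (List Int)) (out : Bool) : Prop := out = is_vexilliary_alt rothe essential_set
instance (rothe : List (List Int)) (essential_set : List (List Int)) (out : Bool) : Decidable (Spec_is_vexilliary rothe essential_set out) := by unfold Spec_is_vexilliary; infer_instance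

-- ===== CLAIM (what is proved, stated in full; the proofs are below) =====
def Claim_equal_is_vexilliary : Prop := ∀ (rothe : List (List Int)) (essential_set : List (List Int)), Dom_is_vexilliary rothe essential_set → Pre_is_vexilliary rothe essential_set → Spec_is_vexilliary rothe essential_set (is_vexilliary rothe essential_set)

-- ===== LEMMAS AND PROOFS =====

-- the strictly-northwest-pair property, over the extracted coordinate pairs
def pvP (es : List (List Int)) : Prop :=
  ∃ p ∈ pvPts es, ∃ q ∈ pvPts es, p.1 < q.1 ∧ p.2 < q.2

lemma pvNW_iff (a b : List Int) :
    pvNW a b = true ↔ (PySem.List.pyGetD a 0 0 < PySem.List.pyGetD b 0 0 ∧ PySem.List.pyGetD a 1 0 < PySem.List.pyGetD b 1 0) := by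
  simp [pvNW]

lemma pvNW_self (a : List Int) : pvNW a a = false := by
  simp [pvNW]

lemma pvInnerA_true_iff (e : List Int) (rest : List (List Int)) :
    pvInnerA e rest = true ↔ ∃ t ∈ rest, (pvNW e t = true ∨ pvNW t e = true) := by
  induction rest with
  | nil => simp [pvInnerA]
  | cons t ts ih =>
    simp only [pvInnerA]
    by_cases h : (pvNW e t || pvNW t e) = true
    · simp only [Bool.or_eq_true] at h
      simp only [if_pos (Bool.or_eq_true .. |>.mpr h), List.mem_cons, true_iff]
      exact ⟨t, Or.inl rfl, h⟩
    · rw [if_neg h, ih]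
      simp only [Bool.or_eq_true] at h
      push_neg at h
      simp only [Bool.not_eq_true] at h
      simp only [List.mem_cons]
      constructor
      · rintro ⟨u, hu, hw⟩; exact ⟨u, Or.inr hu, hw⟩
      · rintro ⟨u, rfl | hu, hw⟩
        · rcases hw with hw | hw <;> simp [h.1, h.2] at hw
        · exact ⟨u, hu, hw⟩

lemma pvOuterA_true_iff (es : List (List Int)) :
    pvOuterA es = true ↔ ¬ ∃ a ∈ es, ∃ b ∈ es, pvNW a b = true := by
  induction es with
  | nil => simp [pvOuterA]
  | cons e rest ih =>
    simp only [pvOuterA]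
    by_cases h : pvInnerA e rest = true
    · rw [if_pos h]
      rw [pvInnerA_true_iff] at h
      rcases h with ⟨t, ht, hw | hw⟩
      · exact iff_of_false Bool.false_ne_true
          (fun hc => hc ⟨e, List.mem_cons_self .., t, List.mem_cons_of_mem _ ht, hw⟩)
      · exact iff_of_false Bool.false_ne_true
          (fun hc => hc ⟨t, List.mem_cons_of_mem _ ht, e, List.mem_cons_self .., hw⟩)
    · rw [if_neg h, ih]
      rw [pvInnerA_true_iff] at h
      push_neg at h
      constructor
      · rintro hno ⟨a, ha, b, hb, hw⟩
        rcases List.mem_cons.mp ha with rfl | ha'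
        · rcases List.mem_cons.mp hb with rfl | hb'
          · rw [pvNW_self] at hw; exact Bool.false_ne_true hw
          · exact (h b hb').1 hw
        · rcases List.mem_cons.mp hb with rfl | hb'
          · exact (h a ha').2 hw
          · exact hno ⟨a, ha', b, hb', hw⟩
      · intro hno hc
        rcases hc with ⟨a, ha, b, hb, hw⟩
        exact hno ⟨a, List.mem_cons_of_mem _ ha, b, List.mem_cons_of_mem _ hb, hw⟩

lemma pvA_true_iff (es : List (List Int)) : pvOuterA es = true ↔ ¬ pvP es := by
  rw [pvOuterA_true_iff]
  unfold pvP pvPts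
  constructor
  · intro h hc
    rcases hc with ⟨p, hp, q, hq, h1, h2⟩
    rcases List.mem_map.mp hp with ⟨a, ha, rfl⟩
    rcases List.mem_map.mp hq with ⟨b, hb, rfl⟩
    exact h ⟨a, ha, b, hb, (pvNW_iff a b).mpr ⟨h1, h2⟩⟩
  · intro h hc
    rcases hc with ⟨a, ha, b, hb, hw⟩
    rw [pvNW_iff] at hw
    exact h ⟨_, List.mem_map_of_mem ha, _, List.mem_map_of_mem hb, hw.1, hw.2⟩

-- B side: the scan detects exactly a violation of y-antitonicity
lemma pvScanB_some_iff (l : List (Int × Int)) (m : Int) :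
    pvScanB (some m) l = true ↔ (∀ q ∈ l, q.2 ≤ m) ∧ l.Pairwise (fun p q => q.2 ≤ p.2) := by
  induction l generalizing m with
  | nil => simp [pvScanB]
  | cons p rest ih =>
    simp only [pvScanB]
    by_cases h : m < p.2
    · simp only [h, if_true]
      constructor
      · intro hc; exact absurd hc Bool.false_ne_true
      · rintro ⟨hall, _⟩
        have := hall p (List.mem_cons_self ..)
        omega
    · simp only [h, if_false, ih, List.pairwise_cons]
      constructor
      · rintro ⟨hall, hpw⟩
        refine ⟨?_, ?_, hpw⟩
        · intro q hq
          rcases List.mem_cons.mp hq with rfl | hq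
          · omega
          · have := hall q hq
            by_cases h2 : p.2 < m <;> simp [h2] at this <;> omega
        · intro q hq
          have := hall q hq
          by_cases h2 : p.2 < m <;> simp [h2] at this <;> omega
      · rintro ⟨hall, hy, hpw⟩
        refine ⟨?_, hpw⟩
        intro q hq
        have h1 := hall q (List.mem_cons_of_mem _ hq)
        have h2 := hy q hq
        by_cases h3 : p.2 < m <;> simp [h3] <;> omega

lemma pvScanB_none_iff (l : List (Int × Int)) :
    pvScanB none l = true ↔ l.Pairwise (fun p q => q.2 ≤ p.2) := by
  cases l with
  | nil => simp [pvScanB]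
  | cons p rest =>
    simp only [pvScanB, pvScanB_some_iff, List.pairwise_cons]

-- insertion-sort pairwise lemma (generic)
lemma pvPairwise_insertBy {α : Type} (before : α → α → Bool)
    (hirr : ∀ a, before a a = false)
    (htr : ∀ x y w, before x y = true → before w y = false → before w x = false)
    (x : α) (ys : List α) (h : ys.Pairwise (fun a b => before b a = false)) :
    (PySem.List.insertBy before x ys).Pairwise (fun a b => before b a = false) := by
  induction ys with
  | nil => simp [PySem.List.insertBy]
  | cons y ys ih =>
    have hstep : PySem.List.insertBy before x (y :: ys)
        = if before x y then x :: y :: ys else y :: PySem.List.insertBy before x ys := rfl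
    rw [hstep]
    rcases List.pairwise_cons.mp h with ⟨hy, hys⟩
    by_cases hxy : before x y = true
    · simp only [hxy, if_true]
      refine List.pairwise_cons.mpr ⟨?_, h⟩
      intro w hw
      rcases List.mem_cons.mp hw with rfl | hw
      · exact htr x w w hxy (hirr w)
      · exact htr x y w hxy (hy w hw)
    · simp only [hxy, if_false]
      refine List.pairwise_cons.mpr ⟨?_, ih hys⟩
      intro w hw
      rcases (PySem.List.mem_insertBy before x w ys).mp hw with rfl | hw
      · exact Bool.eq_false_iff.mpr hxy
      · exact hy w hw

lemma pvPairwise_foldl_insertBy {α : Type} (before : α → α → Bool)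
    (hirr : ∀ a, before a a = false)
    (htr : ∀ x y w, before x y = true → before w y = false → before w x = false)
    (xs acc : List α) (hacc : acc.Pairwise (fun a b => before b a = false)) :
    (xs.foldl (fun acc x => PySem.List.insertBy before x acc) acc).Pairwise (fun a b => before b a = false) := by
  induction xs generalizing acc with
  | nil => simpa using hacc
  | cons x xs ih =>
    simpa using ih _ (pvPairwise_insertBy before hirr htr x acc hacc)

-- the concrete comparison used by sorted2 with keys (x, -y)
def pvBefore (a b : Int × Int) : Bool :=
  decide (a.1 < b.1) || (!decide (b.1 < a.1) && decide (-a.2 < -b.2))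

lemma pvSorted2_eq (xs : List (Int × Int)) :
    PySem.List.sorted2 xs (fun p => p.1) (fun p => -p.2) false
      = xs.foldl (fun acc x => PySem.List.insertBy pvBefore x acc) [] := rfl

lemma pvSorted2_pairwise (xs : List (Int × Int)) :
    (PySem.List.sorted2 xs (fun p => p.1) (fun p => -p.2) false).Pairwise
      (fun a b => a.1 ≤ b.1 ∧ (a.1 < b.1 ∨ b.2 ≤ a.2)) := by
  rw [pvSorted2_eq]
  have h := pvPairwise_foldl_insertBy pvBefore
    (by intro a; simp [pvBefore])
    (by intro x y w hxy hwy; simp only [pvBefore] at *;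
        rcases Bool.or_eq_true .. |>.mp hxy with h1 | h1 <;>
        simp_all <;> omega)
    xs [] (by simp)
  refine h.imp ?_
  intro a b hb
  simp only [pvBefore] at hb
  simp_all
  omega

lemma pvB_true_iff (es : List (List Int)) : is_vexilliary_alt [] es = true ↔ ¬ pvP es := by
  unfold is_vexilliary_alt
  rw [pvScanB_none_iff]
  set S := PySem.List.sorted2 (pvPts es) (fun p => p.1) (fun p => -p.2) false with hS
  have hperm : S.Perm (pvPts es) := PySem.List.sorted2_perm ..
  have hlex := pvSorted2_pairwise (pvPts es)
  rw [← hS] at hlex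
  rw [List.pairwise_iff_getElem] at hlex ⊢
  constructor
  · intro hdesc hc
    rcases hc with ⟨p, hp, q, hq, h1, h2⟩
    have hp' : p ∈ S := hperm.mem_iff.mpr hp
    have hq' : q ∈ S := hperm.mem_iff.mpr hq
    rcases List.mem_iff_getElem.mp hp' with ⟨i, hi, rfl⟩
    rcases List.mem_iff_getElem.mp hq' with ⟨j, hj, rfl⟩
    rcases lt_trichotomy i j with hij | hij | hij
    · have := hdesc i j hi hj hij; omega
    · subst hij; omega
    · have := hlex j i hj hi hij; omega
  · intro hno i j hi hj hij
    have hl := hlex i j hi hj hij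
    by_contra hy
    push_neg at hy
    have hx : S[i].1 < S[j].1 := by omega
    exact hno ⟨S[i], hperm.mem_iff.mp (S.getElem_mem hi), S[j], hperm.mem_iff.mp (S.getElem_mem hj), hx, hy⟩

lemma pvAlt_indep (rothe : List (List Int)) (es : List (List Int)) :
    is_vexilliary_alt rothe es = is_vexilliary_alt [] es := rfl

-- ===== VERDICT (by name: the statement is the Claim_ definition above) =====
theorem is_vexilliary_spec : Claim_equal_is_vexilliary := by
  intro rothe es _ _
  unfold Spec_is_vexilliary
  have hA := pvA_true_iff es
  have hB := pvB_true_iff es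
  unfold is_vexilliary
  rw [pvAlt_indep]
  cases hA' : pvOuterA es <;> cases hB' : is_vexilliary_alt [] es <;> simp_all
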